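-- pv_equiv track=rewrite | github.com/gstoaldo/advent-of-code-2021 | day20/main.py | add_margin
-- ===== SOURCE A (Python) =====
-- DARK = "."
--
-- def add_margin(initial_img, margin=3, filler=DARK):
--     height = len(initial_img) + 2 * margin
--     width = len(initial_img[0]) + 2 * margin
--
--     img = []
--     for i in range(height):
--         row = []
--         if i < margin or i > height - margin - 1:
--             row = [filler] * width
--         else:
--             row = [
--                 *[filler] * margin,
--                 *initial_img[i - margin],
--                 *[filler] * margin,
--             ]
--         img.append(row)
--
--     return img
-- ===== SOURCE B (Python) =====
-- DARK = "."
--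
-- def add_margin(initial_img, margin=3, filler=DARK):
--     pad = [filler] * margin
--     padded = [pad + list(row) + pad for row in initial_img]
--     width = len(initial_img[0]) + 2 * margin
--     empty = [filler] * width
--     border = [empty[:] for _ in range(margin)]
--     return border + padded + [empty[:] for _ in range(margin)]
-- ===== Notes on version B (the rewrite author's own statement) =====
-- stated objective: simpler
-- what changed: B builds the result by concatenating three segments (top filler rows + padded interior rows + bottom filler rows) instead of A's single index loop that tests each output row index against the margins.
-- outside the precondition, e.g. on add_margin([['a'], ['b'], ['c']], -1, '.'): A returns [['b']], B returns [['a'], ['b'], ['c']]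
import Mathlib
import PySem

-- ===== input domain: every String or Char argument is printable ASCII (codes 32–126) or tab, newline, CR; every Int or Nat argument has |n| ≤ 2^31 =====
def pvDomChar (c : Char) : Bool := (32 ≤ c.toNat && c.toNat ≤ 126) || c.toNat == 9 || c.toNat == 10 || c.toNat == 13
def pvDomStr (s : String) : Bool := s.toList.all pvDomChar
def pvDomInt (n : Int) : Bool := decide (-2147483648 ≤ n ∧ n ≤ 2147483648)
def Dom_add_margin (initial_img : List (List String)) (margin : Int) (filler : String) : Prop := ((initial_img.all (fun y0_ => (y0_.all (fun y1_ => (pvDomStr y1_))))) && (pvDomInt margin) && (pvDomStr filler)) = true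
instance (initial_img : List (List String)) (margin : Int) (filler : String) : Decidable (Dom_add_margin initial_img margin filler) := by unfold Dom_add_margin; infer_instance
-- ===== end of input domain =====

-- B builds the padded image by concatenating three segments (top filler rows, interior rows
-- padded left/right, bottom filler rows) instead of A's per-index loop that tests each output
-- row index against the margins; objective: simpler.

-- ===== PORT A =====
def add_margin (initial_img : List (List String)) (margin : Int) (filler : String) : List (List String) :=
  let height : Int := (initial_img.length : Int) + 2 * margin
  let width : Int := ((PySem.List.pyGetD initial_img 0 ([] : List String)).length : Int) + 2 * margin
  (PySem.List.pyRange 0 height 1).foldl (fun img i =>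
    img ++ [if i < margin ∨ i > height - margin - 1 then
              List.replicate width.toNat filler
            else
              List.replicate margin.toNat filler
                ++ PySem.List.pyGetD initial_img (i - margin) ([] : List String)
                ++ List.replicate margin.toNat filler]) []

-- ===== PORT B =====
def add_margin_alt (initial_img : List (List String)) (margin : Int) (filler : String) : List (List String) :=
  let pad := List.replicate margin.toNat filler
  let padded := initial_img.map (fun row => pad ++ row ++ pad)
  let width : Int := ((PySem.List.pyGetD initial_img 0 ([] : List String)).length : Int) + 2 * margin
  let empty := List.replicate width.toNat filler
  let border := List.replicate margin.toNat empty
  border ++ padded ++ List.replicate margin.toNat empty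

-- ===== PRECONDITION & SPEC =====
-- Pre_ requires a nonempty image (A raises IndexError on initial_img == []) and a nonnegative
-- margin: negative counts are outside the task's natural domain, and A's value there (dropping
-- boundary rows) is an accident of its index arithmetic that B does not reproduce — see cites.
def Pre_add_margin (initial_img : List (List String)) (margin : Int) (filler : String) : Prop :=
  initial_img ≠ [] ∧ 0 ≤ margin
instance (initial_img : List (List String)) (margin : Int) (filler : String) : Decidable (Pre_add_margin initial_img margin filler) := by unfold Pre_add_margin; infer_instance
def pvWitness_add_margin : List (List String) × Int × String := ([["a", "b"], ["c", "d"]], 1, ".")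

def Spec_add_margin (initial_img : List (List String)) (margin : Int) (filler : String) (out : List (List String)) : Prop := out = add_margin_alt initial_img margin filler
instance (initial_img : List (List String)) (margin : Int) (filler : String) (out : List (List String)) : Decidable (Spec_add_margin initial_img margin filler out) := by unfold Spec_add_margin; infer_instance

-- ===== CLAIM (what is proved, stated in full; the proofs are below) =====
def Claim_equal_add_margin : Prop := ∀ (initial_img : List (List String)) (margin : Int) (filler : String), Dom_add_margin initial_img margin filler → Pre_add_margin initial_img margin filler → Spec_add_margin initial_img margin filler (add_margin initial_img margin filler)

-- ===== LEMMAS AND PROOFS =====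

-- Reading a list back element by element (with any default) reproduces it.
theorem map_getD_range {α : Type} (xs : List α) (d : α) :
    (List.range xs.length).map (fun j => xs.getD j d) = xs := by
  apply List.ext_getElem
  · simp
  · intro j h1 h2
    simp [List.getD_eq_getElem?_getD, List.getElem?_eq_getElem (by simpa using h2)]

-- ===== VERDICT (by name: the statement is the Claim_ definition above) =====
theorem add_margin_spec : Claim_equal_add_margin := by
  intro img margin filler _ hpre
  obtain ⟨hne, hm⟩ := hpre
  obtain ⟨m, rfl⟩ : ∃ m : Nat, margin = (m : Int) :=
    ⟨margin.toNat, (Int.toNat_of_nonneg hm).symm⟩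
  unfold Spec_add_margin add_margin add_margin_alt
  simp only []
  have hh : ((img.length : Int) + 2 * (m : Int)) = ((img.length + 2 * m : Nat) : Int) := by
    push_cast; ring
  rw [hh, PySem.List.pyRange_zero_natCast, PySem.List.foldl_append_singleton_eq_map,
    List.nil_append, List.map_map]
  set n := img.length with hn
  set empty : List String :=
    List.replicate (((PySem.List.pyGetD img 0 ([] : List String)).length : Int) + 2 * (m : Int)).toNat filler
    with hempty
  set pad : List String := List.replicate ((m : Int)).toNat filler with hpad
  set gc : Nat → List String := fun k =>
    (fun i => if i < (m : Int) ∨ i > ((n + 2 * m : Nat) : Int) - (m : Int) - 1 then empty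
              else pad ++ PySem.List.pyGetD img (i - (m : Int)) ([] : List String) ++ pad) ∘
      (fun k : Nat => (k : Int)) <| k
    with hgc
  show (List.range (n + 2 * m)).map gc
      = List.replicate ((m : Int)).toNat empty ++ img.map (fun row => pad ++ row ++ pad)
          ++ List.replicate ((m : Int)).toNat empty
  have htop : ∀ i < m, gc i = empty := by
    intro i hi
    simp only [hgc, Function.comp]
    rw [if_pos (Or.inl (by exact_mod_cast hi))]
  have hmid : ∀ j < n, gc (m + j) = pad ++ img.getD j [] ++ pad := by
    intro j hj
    simp only [hgc, Function.comp]
    rw [if_neg (by push_cast; omega)]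
    have : ((m + j : Nat) : Int) - (m : Int) = ((j : Nat) : Int) := by push_cast; ring
    rw [this, PySem.List.pyGetD_natCast]
  have hbot : ∀ k < m, gc (m + (n + k)) = empty := by
    intro k hk
    simp only [hgc, Function.comp]
    rw [if_pos (Or.inr (by push_cast; omega))]
  have hsplit : n + 2 * m = m + (n + m) := by omega
  rw [hsplit, List.range_add, List.range_add]
  simp only [List.map_append, List.map_map]
  have h1 : (List.range m).map gc = List.replicate ((m : Int)).toNat empty := by
    rw [List.eq_replicate_iff]
    constructor
    · simp
    · intro b hb
      obtain ⟨i, hi, rfl⟩ := List.mem_map.mp hb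
      exact htop i (List.mem_range.mp hi)
  have h2 : (List.range n).map (gc ∘ fun x => m + x) = img.map (fun row => pad ++ row ++ pad) := by
    calc (List.range n).map (gc ∘ fun x => m + x)
        = (List.range n).map (fun j => pad ++ img.getD j [] ++ pad) := by
          apply List.map_congr_left
          intro j hj
          exact hmid j (List.mem_range.mp hj)
      _ = ((List.range n).map (fun j => img.getD j [])).map (fun row => pad ++ row ++ pad) := by
          rw [List.map_map]; rfl
      _ = img.map (fun row => pad ++ row ++ pad) := by rw [hn, map_getD_range]
  have h3 : (List.range m).map (gc ∘ ((fun x => m + x) ∘ fun x => n + x))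
      = List.replicate ((m : Int)).toNat empty := by
    rw [List.eq_replicate_iff]
    constructor
    · simp
    · intro b hb
      obtain ⟨k, hk, rfl⟩ := List.mem_map.mp hb
      exact hbot k (List.mem_range.mp hk)
  rw [h1, h2, h3, List.append_assoc]
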